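-- pv_equiv track=rewrite | github.com/sodaqqq/simple_regex | myregex.py | parse_regex
-- ===== SOURCE A (Python) =====
-- def parse_regex(regex):
--     """
--     Breaks down the regex into tokens (symbol, operator)
--     """
--     tokens = []
--     i = 0
--     while i < len(regex):
--
--         if i + 1 < len(regex) and regex[i+1] in '*+':
--             tokens.append((regex[i], regex[i+1]))
--             i += 2
--
--         else:
--             tokens.append((regex[i], ''))
--             i += 1
--
--     return tokens
-- ===== SOURCE B (Python) =====
-- def parse_regex(regex):
--     """
--     Breaks down the regex into tokens (symbol, operator)
--     """
--     tokens = []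
--     for c in regex:
--         if c in '*+' and tokens and tokens[-1][1] == '':
--             tokens[-1] = (tokens[-1][0], c)
--         else:
--             tokens.append((c, ''))
--     return tokens
-- ===== Notes on version B (the rewrite author's own statement) =====
-- stated objective: simpler
-- what changed: Replaced the index-based while loop with lookahead and skip-by-2 by a single for-each pass that attaches an operator retroactively to the last token when its operator slot is empty; direct iteration also avoids per-character indexing.
import Mathlib
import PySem

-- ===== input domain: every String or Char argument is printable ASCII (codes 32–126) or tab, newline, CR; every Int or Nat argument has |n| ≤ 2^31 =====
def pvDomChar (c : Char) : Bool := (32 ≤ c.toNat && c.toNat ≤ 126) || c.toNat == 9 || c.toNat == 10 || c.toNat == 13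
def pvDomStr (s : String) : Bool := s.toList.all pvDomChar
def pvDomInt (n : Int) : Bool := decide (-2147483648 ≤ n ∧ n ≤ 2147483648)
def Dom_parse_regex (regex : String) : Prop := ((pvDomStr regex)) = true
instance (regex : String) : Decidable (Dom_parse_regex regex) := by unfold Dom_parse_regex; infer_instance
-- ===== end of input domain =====

-- B replaces A's index/lookahead/skip-by-2 loop by one for-each pass that attaches
-- an operator to the previous token; same output, simpler decomposition.

-- ===== PORT A =====
-- A's while loop over index i, reading regex[i] and the lookahead regex[i+1],
-- transcribed as recursion on the remaining characters (i += 2 drops two, i += 1 drops one).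
def parseA_go : List Char → List (String × String)
  | [] => []
  | [c] => [(String.ofList [c], "")]
  | c1 :: c2 :: rest =>
    if c2 = '*' ∨ c2 = '+' then
      (String.ofList [c1], String.ofList [c2]) :: parseA_go rest
    else
      (String.ofList [c1], "") :: parseA_go (c2 :: rest)
termination_by l => l.length

def parse_regex (regex : String) : List (String × String) :=
  parseA_go regex.toList

-- ===== PORT B =====
-- B's loop body: merge an operator into the last token if its operator slot is empty,
-- otherwise append a fresh (c, '') token.
def stepB (acc : List (String × String)) (c : Char) : List (String × String) :=
  match acc.getLast? with
  | some (s, op) =>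
    if (c = '*' ∨ c = '+') ∧ op = "" then acc.dropLast ++ [(s, String.ofList [c])]
    else acc ++ [(String.ofList [c], "")]
  | none => acc ++ [(String.ofList [c], "")]

def parse_regex_alt (regex : String) : List (String × String) :=
  regex.toList.foldl stepB []

-- ===== PRECONDITION & SPEC =====
def Spec_parse_regex (regex : String) (out : List (String × String)) : Prop := out = parse_regex_alt regex
instance (regex : String) (out : List (String × String)) : Decidable (Spec_parse_regex regex out) := by unfold Spec_parse_regex; infer_instance

-- ===== CLAIM (what is proved, stated in full; the proofs are below) =====
def Claim_equal_parse_regex : Prop := ∀ (regex : String), Dom_parse_regex regex → Spec_parse_regex regex (parse_regex regex)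

-- ===== LEMMAS AND PROOFS =====

-- If the accumulator's last token already carries an operator (or is absent),
-- or the next character is not an operator, stepB simply appends.
lemma stepB_append (acc : List (String × String)) (c : Char)
    (h : (∀ s op, acc.getLast? = some (s, op) → op ≠ "") ∨ ¬(c = '*' ∨ c = '+')) :
    stepB acc c = acc ++ [(String.ofList [c], "")] := by
  unfold stepB
  cases hl : acc.getLast? with
  | none => rfl
  | some t =>
    obtain ⟨s, op⟩ := t
    rcases h with h | h
    · simp [h s op hl]
    · simp [h]

lemma foldB (cs : List Char) :
    ∀ acc : List (String × String),
    ((∀ s op, acc.getLast? = some (s, op) → op ≠ "") ∨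
      (∀ c, cs.head? = some c → ¬(c = '*' ∨ c = '+'))) →
    List.foldl stepB acc cs = acc ++ parseA_go cs := by
  induction cs using parseA_go.induct with
  | case1 =>
    intro acc _
    simp [parseA_go]
  | case2 c =>
    intro acc h
    have h' : (∀ s op, acc.getLast? = some (s, op) → op ≠ "") ∨ ¬(c = '*' ∨ c = '+') := by
      rcases h with h | h
      · exact Or.inl h
      · exact Or.inr (h c rfl)
    simp [List.foldl, stepB_append acc c h', parseA_go]
  | case3 c1 c2 rest hop ih =>
    intro acc h
    have h' : (∀ s op, acc.getLast? = some (s, op) → op ≠ "") ∨ ¬(c1 = '*' ∨ c1 = '+') := by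
      rcases h with h | h
      · exact Or.inl h
      · exact Or.inr (h c1 rfl)
    have e1 : stepB acc c1 = acc ++ [(String.ofList [c1], "")] := stepB_append acc c1 h'
    have e2 : stepB (acc ++ [(String.ofList [c1], "")]) c2
        = acc ++ [(String.ofList [c1], String.ofList [c2])] := by
      unfold stepB
      simp [hop]
    have e3 := ih (acc ++ [(String.ofList [c1], String.ofList [c2])])
      (Or.inl (by
        intro s op hl hc
        simp at hl
        rw [← hl.2] at hc
        have := congrArg String.toList hc
        simp at this))
    rw [List.foldl_cons, e1, List.foldl_cons, e2, e3]
    simp [parseA_go, hop]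
  | case4 c1 c2 rest hop ih =>
    intro acc h
    have h' : (∀ s op, acc.getLast? = some (s, op) → op ≠ "") ∨ ¬(c1 = '*' ∨ c1 = '+') := by
      rcases h with h | h
      · exact Or.inl h
      · exact Or.inr (h c1 rfl)
    have e1 : stepB acc c1 = acc ++ [(String.ofList [c1], "")] := stepB_append acc c1 h'
    have e3 := ih (acc ++ [(String.ofList [c1], "")])
      (Or.inr (by intro c hc hcop; cases hc; exact hop hcop))
    rw [List.foldl_cons, e1, e3]
    simp [parseA_go, hop]

-- ===== VERDICT (by name: the statement is the Claim_ definition above) =====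
theorem parse_regex_spec : Claim_equal_parse_regex := by
  intro regex _
  unfold Spec_parse_regex parse_regex parse_regex_alt
  rw [foldB regex.toList [] (Or.inl (by intro s op h; simp at h))]
  simp
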